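-- pv_equiv track=rewrite | github.com/dusskdus/CodingTest_Python | 프로그래머스/2/131127. 할인 행사/할인 행사.py | solution
-- ===== SOURCE A (Python) =====
-- from collections import Counter
--
-- def solution(want, number, discount):
--     answer = 0
--     dic = {}
--     for k in range(len(want)): #want와 number key로 묶기
--         dic[want[k]] = number[k]
--
--     for i in range(len(discount)-9):
--         shop = discount[i:i+10]
--         if Counter(shop) == dic:
--             answer+=1
--     return answer
-- ===== SOURCE B (Python) =====
-- def solution(want, number, discount):
--     need = {}
--     for w, n in zip(want, number):
--         need[w] = n
--     if len(discount) < 10 or any(v <= 0 for v in need.values()):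
--         return 0
--     cnt = {}
--     bad = len(need)  # keys whose window count differs from its wanted count
--
--     def upd(x, d):
--         nonlocal bad
--         before = cnt.get(x, 0)
--         after = before + d
--         cnt[x] = after
--         t = need.get(x, 0)
--         if (before == t) != (after == t):
--             bad += 1 if before == t else -1
--
--     for x in discount[:10]:
--         upd(x, 1)
--     answer = 1 if bad == 0 else 0
--     for i in range(10, len(discount)):
--         upd(discount[i], 1)
--         upd(discount[i - 10], -1)
--         if bad == 0:
--             answer += 1
--     return answer
-- ===== Notes on version B (the rewrite author's own statement) =====
-- stated objective: faster
-- what changed: Instead of rebuilding a Counter of each length-10 slice and comparing whole dicts per window, B slides the window once over discount, updating one count entry and a mismatched-key counter per step, so each window test is O(1).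
import Mathlib
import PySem

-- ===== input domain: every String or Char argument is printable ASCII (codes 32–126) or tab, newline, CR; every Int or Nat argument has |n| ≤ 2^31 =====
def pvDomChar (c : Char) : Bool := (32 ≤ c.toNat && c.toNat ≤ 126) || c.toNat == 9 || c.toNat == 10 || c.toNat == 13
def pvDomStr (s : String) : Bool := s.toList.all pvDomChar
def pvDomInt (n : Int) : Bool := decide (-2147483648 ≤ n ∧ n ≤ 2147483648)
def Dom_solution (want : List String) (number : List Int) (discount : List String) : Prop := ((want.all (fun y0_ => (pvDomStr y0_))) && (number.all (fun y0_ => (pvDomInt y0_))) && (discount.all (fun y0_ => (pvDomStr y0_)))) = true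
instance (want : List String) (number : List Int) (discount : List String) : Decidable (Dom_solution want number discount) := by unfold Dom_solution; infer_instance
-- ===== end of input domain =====

-- B replaces A's per-window Counter construction and dict comparison by a single sliding pass that
-- updates one count entry and a mismatched-key counter per position (objective: faster, constant factor).

-- ===== PORT A =====
-- Python's dict == (order-insensitive): same key set, equal value at each key
def pyDictEq (d1 d2 : PySem.Dict String Int) : Bool :=
  PySem.Set.equal (PySem.Set.ofList d1.keys) (PySem.Set.ofList d2.keys) &&
  d1.keys.all (fun k => d1.getD k 0 == d2.getD k 0)

def solution (want : List String) (number : List Int) (discount : List String) : Int :=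
  let dic := (PySem.List.pyRange 0 (PySem.List.len want) 1).foldl
      (fun d k => d.insert (PySem.List.pyGetD want k "") (PySem.List.pyGetD number k 0)) PySem.Dict.empty
  (PySem.List.pyRange 0 (PySem.List.len discount - 9) 1).foldl
      (fun answer i =>
        let shop := PySem.List.slice discount (some i) (some (i + 10))
        if pyDictEq (PySem.Dict.counter shop) dic then answer + 1 else answer) 0

-- ===== PORT B =====
-- upd(x, d): adjust the window count of x by d and maintain bad, the number of mismatched keys
def updB (need : PySem.Dict String Int) (st : PySem.Dict String Int × Int) (x : String) (d : Int) :
    PySem.Dict String Int × Int :=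
  let before := st.1.getD x 0
  let after := before + d
  let t := need.getD x 0
  (st.1.insert x after,
   if (before == t) != (after == t) then (if before == t then st.2 + 1 else st.2 - 1) else st.2)

def solution_alt (want : List String) (number : List Int) (discount : List String) : Int :=
  let need := (want.zip number).foldl (fun d p => d.insert p.1 p.2) PySem.Dict.empty
  if PySem.List.len discount < 10 || need.values.any (fun v => decide (v ≤ 0)) then 0
  else
    let st0 := (PySem.List.slice discount none (some 10)).foldl (fun st x => updB need st x 1)
        (PySem.Dict.empty, (need.size : Int))
    let ans0 : Int := if st0.2 == 0 then 1 else 0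
    ((PySem.List.pyRange 10 (PySem.List.len discount) 1).foldl
      (fun acc i =>
        let st1 := updB need acc.1 (PySem.List.pyGetD discount i "") 1
        let st2 := updB need st1 (PySem.List.pyGetD discount (i - 10) "") (-1)
        (st2, if st2.2 == 0 then acc.2 + 1 else acc.2)) (st0, ans0)).2

-- ===== PRECONDITION & SPEC =====
-- Pre_ excludes only len(want) > len(number), where A raises IndexError reading number[k].
def Pre_solution (want : List String) (number : List Int) (discount : List String) : Prop :=
  want.length ≤ number.length
instance (want : List String) (number : List Int) (discount : List String) : Decidable (Pre_solution want number discount) := by unfold Pre_solution; infer_instance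

def pvWitness_solution : List String × List Int × List String :=
  (["a"], [2], ["a", "a", "b", "a", "a", "a", "b", "a", "a", "a"])

def Spec_solution (want : List String) (number : List Int) (discount : List String) (out : Int) : Prop := out = solution_alt want number discount
instance (want : List String) (number : List Int) (discount : List String) (out : Int) : Decidable (Spec_solution want number discount out) := by unfold Spec_solution; infer_instance

-- ===== CLAIM (what is proved, stated in full; the proofs are below) =====
def Claim_equal_solution : Prop := ∀ (want : List String) (number : List Int) (discount : List String), Dom_solution want number discount → Pre_solution want number discount → Spec_solution want number discount (solution want number discount)

-- ===== LEMMAS AND PROOFS =====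

-- mismatch counter: number of keys of U whose count (under c) differs from its wanted count
def badCnt (need : PySem.Dict String Int) (U : List String) (c : String → Int) : Int :=
  ((U.filter (fun k => !(c k == need.getD k 0))).length : Int)

-- counts of the length-10 window starting at j
def cw (discount : List String) (j : Nat) : String → Int :=
  fun k => (((discount.drop j).take 10).count k : Int)

-- the key universe used by the sliding-window invariant
def Ufor (need : PySem.Dict String Int) (discount : List String) : List String :=
  need.keys ++ discount.dedup.filter (fun k => !need.keys.contains k)

theorem mem_Ufor (need : PySem.Dict String Int) (discount : List String) (k : String) :
    k ∈ Ufor need discount ↔ k ∈ need.keys ∨ k ∈ discount := by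
  unfold Ufor
  simp [List.mem_filter, List.mem_dedup]
  tauto

theorem nodup_Ufor (need : PySem.Dict String Int) (discount : List String)
    (h : need.keys.Nodup) : (Ufor need discount).Nodup := by
  refine List.Nodup.append h (List.Nodup.filter _ discount.nodup_dedup) ?_
  intro k hk hk2
  simp [List.mem_filter] at hk2
  exact hk2.2 hk

theorem nodup_keys_needOf (want : List String) (number : List Int) :
    ((want.zip number).foldl (fun d p => d.insert p.1 p.2) PySem.Dict.empty).keys.Nodup :=
  PySem.Dict.nodup_keys_foldl_insert_key _ Prod.fst (fun _ p => p.2) _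
    (by simp [PySem.Dict.keys_empty])

theorem build_aux (a : List String) : ∀ (b : List Int), a.length ≤ b.length →
    ∀ (d : PySem.Dict String Int),
    (List.range a.length).foldl (fun d j => d.insert (a.getD j "") (b.getD j 0)) d
    = (a.zip b).foldl (fun d p => d.insert p.1 p.2) d := by
  induction a with
  | nil => intro b h d; simp
  | cons x a ih =>
    intro b h d
    cases b with
    | nil => simp at h
    | cons y b =>
      simp only [List.length_cons, List.range_succ_eq_map, List.foldl_cons, List.foldl_map,
        List.getD_cons_zero, List.getD_cons_succ, List.zip_cons_cons]
      exact ih b (by simpa using h) _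

-- A's indexed dict-building loop builds exactly B's zip-built dict
theorem build_eq (want : List String) (number : List Int) (h : want.length ≤ number.length) :
    (PySem.List.pyRange 0 (PySem.List.len want) 1).foldl
      (fun d k => d.insert (PySem.List.pyGetD want k "") (PySem.List.pyGetD number k 0))
      PySem.Dict.empty
    = (want.zip number).foldl (fun d p => d.insert p.1 p.2) PySem.Dict.empty := by
  rw [PySem.List.pyRange_one, List.foldl_map]
  simp only [PySem.List.len_eq, zero_add, sub_zero, Int.toNat_natCast, PySem.List.pyGetD_natCast]
  exact build_aux want number h _

theorem badCnt_congr (need : PySem.Dict String Int) (U : List String) {c1 c2 : String → Int}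
    (h : ∀ k, c1 k = c2 k) : badCnt need U c1 = badCnt need U c2 := by
  unfold badCnt; congr 1; rw [List.filter_congr (fun k _ => by rw [h k])]

theorem filter_length_update {U : List String} (hU : U.Nodup) {x : String} (hx : x ∈ U)
    (p q : String → Bool) (hagree : ∀ k, k ≠ x → p k = q k) :
    ((U.filter q).length : Int)
      = ((U.filter p).length : Int) + (if q x then 1 else 0) - (if p x then 1 else 0) := by
  induction U with
  | nil => simp at hx
  | cons a tl ih =>
    rcases List.nodup_cons.mp hU with ⟨ha, htl⟩
    by_cases hax : a = x
    · subst hax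
      have hfeq : tl.filter p = tl.filter q :=
        List.filter_congr (fun k hk => hagree k (fun he => ha (he ▸ hk)))
      simp only [List.filter_cons]
      rw [hfeq]
      by_cases hp : p a <;> by_cases hq : q a <;> simp [hp, hq] <;> omega
    · have hmem : x ∈ tl := by
        rcases List.mem_cons.mp hx with h | h
        · exact absurd h.symm hax
        · exact h
      have : p a = q a := hagree a hax
      simp only [List.filter_cons, ← this]
      by_cases hp : p a <;> simp [hp, ih htl hmem] <;> omega

theorem updB_spec (need : PySem.Dict String Int) {U : List String} (hU : U.Nodup)
    (st : PySem.Dict String Int × Int) (c : String → Int) {x : String} (d : Int) (hx : x ∈ U)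
    (h1 : ∀ k, st.1.getD k 0 = c k) (h2 : st.2 = badCnt need U c) :
    (∀ k, (updB need st x d).1.getD k 0 = (if k = x then c k + d else c k)) ∧
    (updB need st x d).2 = badCnt need U (fun k => if k = x then c k + d else c k) := by
  constructor
  · intro k
    simp only [updB, PySem.Dict.getD_insert, h1]
    split <;> [skip; rfl]
    subst ‹k = x›; rfl
  · have hflt := filter_length_update hU hx (fun k => !(c k == need.getD k 0))
      (fun k => !((if k = x then c k + d else c k) == need.getD k 0))
      (fun k hk => by simp [hk])
    simp only [updB, h1, h2, badCnt] at *
    rw [hflt]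
    simp only [beq_iff_eq, bne_iff_ne, ne_eq]
    by_cases h3 : c x = need.getD x 0 <;> by_cases h4 : c x + d = need.getD x 0 <;>
      simp [h3, h4] <;> omega

theorem fold_add_spec (need : PySem.Dict String Int) {U : List String} (hU : U.Nodup) :
    ∀ (l : List String), (∀ x ∈ l, x ∈ U) →
    ∀ (st : PySem.Dict String Int × Int) (c : String → Int),
    (∀ k, st.1.getD k 0 = c k) → st.2 = badCnt need U c →
    (∀ k, (l.foldl (fun st x => updB need st x 1) st).1.getD k 0 = c k + l.count k) ∧
    (l.foldl (fun st x => updB need st x 1) st).2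
      = badCnt need U (fun k => c k + l.count k) := by
  intro l
  induction l with
  | nil =>
    intro _ st c h1 h2
    constructor
    · intro k; simpa using h1 k
    · simpa using h2.trans (badCnt_congr need U (by intro k; simp))
  | cons x l ih =>
    intro hl st c h1 h2
    have hx : x ∈ U := hl x (by simp)
    have hstep := updB_spec need hU st c 1 hx h1 h2
    have := ih (fun y hy => hl y (by simp [hy])) (updB need st x 1)
      (fun k => if k = x then c k + 1 else c k) hstep.1 hstep.2
    simp only [List.foldl_cons]
    constructor
    · intro k
      rw [this.1 k, List.count_cons]
      by_cases hk : k = x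
      · subst hk; simp; push_cast; ring
      · have hxk : ¬ x = k := fun h => hk h.symm
        simp [hk, hxk]
    · rw [this.2]
      refine badCnt_congr need U (fun k => ?_)
      rw [List.count_cons]
      by_cases hk : k = x
      · subst hk; simp; push_cast; ring
      · have hxk : ¬ x = k := fun h => hk h.symm
        simp [hk, hxk]

theorem badCnt_init (need : PySem.Dict String Int) (discount : List String)
    (hk : need.keys.Nodup) (hpos : ∀ k ∈ need.keys, 0 < need.getD k 0) :
    badCnt need (Ufor need discount) (fun _ => 0) = (need.size : Int) := by
  unfold badCnt Ufor
  rw [List.filter_append]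
  have h1 : need.keys.filter (fun k => !((0:Int) == need.getD k 0)) = need.keys := by
    rw [List.filter_eq_self]
    intro k hkk
    have := hpos k hkk
    simp only [Bool.not_eq_true', beq_eq_false_iff_ne, ne_eq]
    omega
  have h2 : (discount.dedup.filter (fun k => !need.keys.contains k)).filter
      (fun k => !((0:Int) == need.getD k 0)) = [] := by
    rw [List.filter_eq_nil_iff]
    intro k hkk
    simp only [List.mem_filter] at hkk
    have hnc : need.contains k = false := by
      rcases h : need.contains k with _ | _
      · rfl
      · exact absurd (by simpa using ((PySem.Dict.contains_iff_mem_keys need k).mp h))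
          (by simpa using hkk.2)
    rw [PySem.Dict.getD_of_not_contains need 0 hnc]
    simp
  rw [h1, h2]
  simp [PySem.Dict.keys, PySem.Dict.size]

theorem badCnt_eq_zero_iff (need : PySem.Dict String Int) (U : List String) (c : String → Int)
    (hmemU : ∀ k, c k ≠ 0 ∨ k ∈ need.keys → k ∈ U) :
    badCnt need U c = 0 ↔ ∀ k, c k = need.getD k 0 := by
  unfold badCnt
  rw [show (((U.filter (fun k => !(c k == need.getD k 0))).length : Int) = 0) ↔
      (U.filter (fun k => !(c k == need.getD k 0))) = [] by
    simp [List.length_eq_zero_iff]]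
  rw [List.filter_eq_nil_iff]
  constructor
  · intro h k
    by_cases hku : k ∈ U
    · have := h k hku
      simpa using this
    · have h1 : c k = 0 := by
        by_contra hc
        exact hku (hmemU k (Or.inl hc))
      have h2 : k ∉ need.keys := fun hm => hku (hmemU k (Or.inr hm))
      have hnc : need.contains k = false := by
        rcases hcc : need.contains k with _ | _
        · rfl
        · exact absurd ((PySem.Dict.contains_iff_mem_keys need k).mp hcc) h2
      rw [h1, PySem.Dict.getD_of_not_contains need 0 hnc]
  · intro h k _
    simp [h k]

theorem pyDictEq_counter_iff (need : PySem.Dict String Int) (hk : need.keys.Nodup)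
    (hpos : ∀ k ∈ need.keys, 0 < need.getD k 0) (w : List String) :
    pyDictEq (PySem.Dict.counter w) need = true ↔ ∀ k, (w.count k : Int) = need.getD k 0 := by
  unfold pyDictEq
  rw [Bool.and_eq_true, PySem.Set.equal_iff, List.all_eq_true]
  constructor
  · rintro ⟨hkeys, hvals⟩ k
    by_cases hkw : k ∈ w
    · have hmem : k ∈ (PySem.Dict.counter w).keys := by
        rw [PySem.Dict.keys_counter]; exact (PySem.Set.mem_ofList w k).mpr hkw
      have := hvals k hmem
      simpa [PySem.Dict.getD_counter] using this
    · have h1 : w.count k = 0 := List.count_eq_zero.mpr hkw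
      have h2 : k ∉ need.keys := by
        intro hm
        have : k ∈ PySem.Set.ofList (PySem.Dict.counter w).keys := by
          refine (hkeys k).mpr ?_
          rw [PySem.Set.mem_ofList]; exact hm
        rw [PySem.Dict.keys_counter, PySem.Set.ofList_ofList, PySem.Set.mem_ofList] at this
        exact hkw this
      have hnc : need.contains k = false := by
        rcases hcc : need.contains k with _ | _
        · rfl
        · exact absurd ((PySem.Dict.contains_iff_mem_keys need k).mp hcc) h2
      rw [h1, PySem.Dict.getD_of_not_contains need 0 hnc]
      simp
  · intro h
    have hiff : ∀ k, k ∈ w ↔ k ∈ need.keys := by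
      intro k
      constructor
      · intro hkw
        by_contra h2
        have hnc : need.contains k = false := by
          rcases hcc : need.contains k with _ | _
          · rfl
          · exact absurd ((PySem.Dict.contains_iff_mem_keys need k).mp hcc) h2
        have hck := h k
        rw [PySem.Dict.getD_of_not_contains need 0 hnc] at hck
        have hpos2 : 0 < w.count k := List.count_pos_iff.mpr hkw
        omega
      · intro hm
        have hp := hpos k hm
        have hck := h k
        by_contra hkw
        rw [List.count_eq_zero.mpr hkw] at hck
        simp at hck
        omega
    constructor
    · intro k
      rw [PySem.Dict.keys_counter, PySem.Set.ofList_ofList, PySem.Set.mem_ofList,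
        PySem.Set.mem_ofList]
      exact hiff k
    · intro k hm
      rw [PySem.Dict.keys_counter] at hm
      rw [PySem.Dict.getD_counter]
      simp [h k]

theorem pyDictEq_counter_false (need : PySem.Dict String Int) {k0 : String}
    (hk0 : k0 ∈ need.keys) (hv : need.getD k0 0 ≤ 0) (w : List String) :
    pyDictEq (PySem.Dict.counter w) need = false := by
  by_contra h
  rw [Bool.not_eq_false] at h
  unfold pyDictEq at h
  rw [Bool.and_eq_true, PySem.Set.equal_iff, List.all_eq_true] at h
  obtain ⟨hkeys, hvals⟩ := h
  have hkw : k0 ∈ w := by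
    have := (hkeys k0).mpr (by rw [PySem.Set.mem_ofList]; exact hk0)
    rwa [PySem.Dict.keys_counter, PySem.Set.ofList_ofList, PySem.Set.mem_ofList] at this
  have hmem : k0 ∈ (PySem.Dict.counter w).keys := by
    rw [PySem.Dict.keys_counter]; exact (PySem.Set.mem_ofList w k0).mpr hkw
  have := hvals k0 hmem
  rw [PySem.Dict.getD_counter] at this
  have hcp : 0 < w.count k0 := List.count_pos_iff.mpr hkw
  simp only [beq_iff_eq] at this
  omega

theorem cw_step (discount : List String) (m : Nat) (h : 10 + m < discount.length) (k : String) :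
    (if k = discount[m]'(by omega)
      then (if k = discount[10 + m]'h then cw discount m k + 1 else cw discount m k) + (-1)
      else (if k = discount[10 + m]'h then cw discount m k + 1 else cw discount m k))
    = cw discount (m + 1) k := by
  have hm : m < discount.length := by omega
  have hd1 : (discount.drop m).take 11 = (discount.drop m).take 10 ++ [discount[10 + m]'h] := by
    rw [List.take_add_one]
    congr 1
    rw [List.getElem?_drop]
    rw [List.getElem?_eq_getElem (by omega)]
    simp [Nat.add_comm]
  have hd2 : (discount.drop m).take 11 = discount[m]'hm :: (discount.drop (m+1)).take 10 := by
    rw [List.drop_eq_getElem_cons hm]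
    rfl
  have hcnt : (((discount.drop m).take 10).count k : Int)
        + (if k = discount[10+m]'h then 1 else 0)
      = (if k = discount[m]'hm then 1 else 0)
        + (((discount.drop (m+1)).take 10).count k : Int) := by
    have hcc := congrArg (List.count k) (hd1.symm.trans hd2)
    simp only [List.count_append, List.count_cons, List.count_nil, beq_iff_eq] at hcc
    split_ifs at hcc ⊢ <;> (try subst_vars) <;> (try push_cast at hcc ⊢) <;>
      first | omega | tauto
  unfold cw
  split_ifs at hcnt ⊢ <;> omega

theorem loop_spec (need : PySem.Dict String Int) (discount : List String)
    (hk : need.keys.Nodup) (st0 : PySem.Dict String Int × Int)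
    (h01 : ∀ k, st0.1.getD k 0 = cw discount 0 k)
    (h02 : st0.2 = badCnt need (Ufor need discount) (cw discount 0)) :
    ∀ (m : Nat), 10 + m ≤ discount.length →
    (∀ k, ((PySem.List.pyRange 10 (10 + (m:Int)) 1).foldl
      (fun acc i =>
        let st1 := updB need acc.1 (PySem.List.pyGetD discount i "") 1
        let st2 := updB need st1 (PySem.List.pyGetD discount (i - 10) "") (-1)
        (st2, if st2.2 == 0 then acc.2 + 1 else acc.2))
      (st0, if st0.2 == 0 then (1:Int) else 0)).1.1.getD k 0 = cw discount m k) ∧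
    ((PySem.List.pyRange 10 (10 + (m:Int)) 1).foldl
      (fun acc i =>
        let st1 := updB need acc.1 (PySem.List.pyGetD discount i "") 1
        let st2 := updB need st1 (PySem.List.pyGetD discount (i - 10) "") (-1)
        (st2, if st2.2 == 0 then acc.2 + 1 else acc.2))
      (st0, if st0.2 == 0 then (1:Int) else 0)).1.2
        = badCnt need (Ufor need discount) (cw discount m) ∧
    ((PySem.List.pyRange 10 (10 + (m:Int)) 1).foldl
      (fun acc i =>
        let st1 := updB need acc.1 (PySem.List.pyGetD discount i "") 1
        let st2 := updB need st1 (PySem.List.pyGetD discount (i - 10) "") (-1)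
        (st2, if st2.2 == 0 then acc.2 + 1 else acc.2))
      (st0, if st0.2 == 0 then (1:Int) else 0)).2
        = (((List.range (m+1)).countP
            (fun j => badCnt need (Ufor need discount) (cw discount j) == 0)) : Int) := by
  intro m
  induction m with
  | zero =>
    intro _
    rw [show ((10:Int) + ((0:Nat):Int)) = 10 by simp, PySem.List.pyRange_one_eq_nil (le_refl _)]
    refine ⟨h01, h02, ?_⟩
    simp only [List.foldl_nil, List.range_one, List.countP_cons, List.countP_nil]
    rw [h02]
    by_cases hb : badCnt need (Ufor need discount) (cw discount 0) = 0 <;> simp [hb]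
  | succ m ih =>
    intro hm
    have hm' : 10 + m ≤ discount.length := by omega
    have hlt : 10 + m < discount.length := by omega
    obtain ⟨ih1, ih2, ih3⟩ := ih hm'
    have hcast : (10 + ((m+1:Nat):Int)) = (10 + (m:Int)) + 1 := by push_cast; ring
    rw [hcast, PySem.List.pyRange_one_succ_right (by omega), List.foldl_append, List.foldl_cons,
      List.foldl_nil]
    have hU := nodup_Ufor need discount hk
    have hget1 : PySem.List.pyGetD discount (10 + (m:Int)) "" = discount[10+m]'hlt := by
      rw [show ((10:Int) + (m:Int)) = ((10+m : Nat) : Int) by push_cast; ring]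
      rw [PySem.List.pyGetD_natCast]
      exact List.getD_eq_getElem _ _ hlt
    have hget2 : PySem.List.pyGetD discount (10 + (m:Int) - 10) "" = discount[m]'(by omega) := by
      rw [show ((10:Int) + (m:Int) - 10) = ((m : Nat) : Int) by push_cast; ring]
      rw [PySem.List.pyGetD_natCast]
      exact List.getD_eq_getElem _ _ (by omega)
    have hx1 : discount[10+m]'hlt ∈ Ufor need discount :=
      (mem_Ufor need discount _).mpr (Or.inr (List.getElem_mem _))
    have hx2 : discount[m]'(by omega : m < discount.length) ∈ Ufor need discount :=
      (mem_Ufor need discount _).mpr (Or.inr (List.getElem_mem _))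
    simp only [hget1, hget2]
    have hs1 := updB_spec need hU _ (cw discount m) 1 hx1 ih1 ih2
    have hs2 := updB_spec need hU _ _ (-1) hx2 hs1.1 hs1.2
    have hcnt : ∀ k, (updB need (updB need (List.foldl
        (fun acc i =>
          (updB need (updB need acc.1 (PySem.List.pyGetD discount i "") 1)
              (PySem.List.pyGetD discount (i - 10) "") (-1),
            if ((updB need (updB need acc.1 (PySem.List.pyGetD discount i "") 1)
                  (PySem.List.pyGetD discount (i - 10) "") (-1)).2 == 0) = true
            then acc.2 + 1 else acc.2))
        (st0, if (st0.2 == 0) = true then (1:Int) else 0)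
        (PySem.List.pyRange 10 (10 + (m:Int)) 1)).1 (discount[10+m]'hlt) 1)
        (discount[m]'(by omega)) (-1)).1.getD k 0 = cw discount (m+1) k := by
      intro k
      rw [hs2.1 k, ← cw_step discount m hlt k]
    have hbad : (updB need (updB need (List.foldl
        (fun acc i =>
          (updB need (updB need acc.1 (PySem.List.pyGetD discount i "") 1)
              (PySem.List.pyGetD discount (i - 10) "") (-1),
            if ((updB need (updB need acc.1 (PySem.List.pyGetD discount i "") 1)
                  (PySem.List.pyGetD discount (i - 10) "") (-1)).2 == 0) = true
            then acc.2 + 1 else acc.2))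
        (st0, if (st0.2 == 0) = true then (1:Int) else 0)
        (PySem.List.pyRange 10 (10 + (m:Int)) 1)).1 (discount[10+m]'hlt) 1)
        (discount[m]'(by omega)) (-1)).2
        = badCnt need (Ufor need discount) (cw discount (m+1)) := by
      rw [hs2.2]; exact badCnt_congr need _ (fun k => cw_step discount m hlt k)
    refine ⟨hcnt, hbad, ?_⟩
    rw [List.range_succ, List.countP_append, List.countP_cons, List.countP_nil]
    simp only [hbad, ih3]
    by_cases hb : badCnt need (Ufor need discount) (cw discount (m+1)) = 0 <;>
      simp [hb] <;> push_cast <;> ring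

theorem solution_spec : Claim_equal_solution := by
  intro want number discount _ hpre
  unfold Spec_solution solution solution_alt
  rw [build_eq want number hpre]
  set need := (want.zip number).foldl (fun d p => d.insert p.1 p.2) PySem.Dict.empty with hneed
  have hk : need.keys.Nodup := nodup_keys_needOf want number
  by_cases hlen : discount.length < 10
  · -- fewer than 10 days: A's range is empty, B's guard fires
    have hc : (decide (PySem.List.len discount < 10)
        || need.values.any (fun v => decide (v ≤ 0))) = true := by
      simp only [Bool.or_eq_true, decide_eq_true_eq, PySem.List.len_eq]
      left
      exact_mod_cast hlen
    have hnil : PySem.List.pyRange 0 (PySem.List.len discount - 9) 1 = [] :=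
      PySem.List.pyRange_one_eq_nil (by simp [PySem.List.len_eq]; omega)
    rw [hnil, if_pos hc]
    rfl
  · by_cases hbadv : need.values.any (fun v => decide (v ≤ 0)) = true
    · -- some wanted count is ≤ 0: no window can match, both return 0
      obtain ⟨v, hv, hvle'⟩ := List.any_eq_true.mp hbadv
      have hvle : v ≤ 0 := by simpa using hvle'
      rw [PySem.Dict.values_eq_map_keys need hk 0] at hv
      obtain ⟨k0, hk0, rfl⟩ := List.mem_map.mp hv
      have hc : (decide (PySem.List.len discount < 10)
          || need.values.any (fun v => decide (v ≤ 0))) = true := by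
        simp [hbadv]
      rw [if_pos hc]
      have hAzero : List.foldl (fun answer i => if pyDictEq (PySem.Dict.counter
          (PySem.List.slice discount (some i) (some (i + 10)))) need = true
          then answer + 1 else answer) 0 (PySem.List.pyRange 0 (PySem.List.len discount - 9) 1)
          = (0 : Int) := by
        rw [PySem.List.foldl_count_if]
        rw [List.countP_eq_zero.mpr
          (fun i _ => by simp [pyDictEq_counter_false need hk0 hvle])]
        simp
      exact hAzero
    · -- main case: at least 10 days and every wanted count positive
      have hn10 : 10 ≤ discount.length := by omega
      have hpos : ∀ k ∈ need.keys, 0 < need.getD k 0 := by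
        intro k hkm
        have hval : need.getD k 0 ∈ need.values := by
          rw [PySem.Dict.values_eq_map_keys need hk 0]
          exact List.mem_map.mpr ⟨k, hkm, rfl⟩
        by_contra hle
        exact hbadv (List.any_eq_true.mpr ⟨_, hval, by simp; omega⟩)
      have hcond : ¬ ((decide (PySem.List.len discount < 10)
          || need.values.any (fun v => decide (v ≤ 0))) = true) := by
        refine fun hcc => ?_
        rcases Bool.or_eq_true _ _ ▸ hcc with h | h
        · rw [decide_eq_true_eq] at h
          rw [PySem.List.len_eq] at h
          exact hlen (by exact_mod_cast h)
        · exact hbadv h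
      rw [if_neg hcond]
      have hU := nodup_Ufor need discount hk
      have htake : PySem.List.slice discount none (some 10) = discount.take 10 := by
        rw [show (10:Int) = ((10:Nat):Int) from rfl, PySem.List.slice_to_natCast]
      have hst0 := fold_add_spec need hU (discount.take 10)
        (fun x hx => (mem_Ufor need discount x).mpr (Or.inr (List.mem_of_mem_take hx)))
        (PySem.Dict.empty, (need.size : Int)) (fun _ => 0)
        (fun k => by simp [PySem.Dict.getD_empty])
        (badCnt_init need discount hk hpos).symm
      have hst01 : ∀ k, ((discount.take 10).foldl (fun st x => updB need st x 1)
          (PySem.Dict.empty, (need.size : Int))).1.getD k 0 = cw discount 0 k := by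
        intro k
        rw [hst0.1 k]
        simp [cw]
      have hst02 : ((discount.take 10).foldl (fun st x => updB need st x 1)
          (PySem.Dict.empty, (need.size : Int))).2
          = badCnt need (Ufor need discount) (cw discount 0) := by
        rw [hst0.2]
        exact badCnt_congr need _ (fun k => by simp [cw])
      have hcast : PySem.List.len discount = 10 + (((discount.length - 10 : Nat)) : Int) := by
        simp [PySem.List.len_eq]; omega
      have hBeq : ((PySem.List.pyRange 10 (PySem.List.len discount) 1).foldl
          (fun acc i =>
            let st1 := updB need acc.1 (PySem.List.pyGetD discount i "") 1
            let st2 := updB need st1 (PySem.List.pyGetD discount (i - 10) "") (-1)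
            (st2, if st2.2 == 0 then acc.2 + 1 else acc.2))
          ((PySem.List.slice discount none (some 10)).foldl (fun st x => updB need st x 1)
            (PySem.Dict.empty, (need.size : Int)),
           if ((PySem.List.slice discount none (some 10)).foldl (fun st x => updB need st x 1)
            (PySem.Dict.empty, (need.size : Int))).2 == 0 then (1:Int) else 0)).2
          = ((List.range (discount.length - 10 + 1)).countP
              (fun j => badCnt need (Ufor need discount) (cw discount j) == 0) : Int) := by
        rw [htake, hcast]
        exact (loop_spec need discount hk _ hst01 hst02 (discount.length - 10) (by omega)).2.2
      have hAeq : List.foldl (fun answer i => if pyDictEq (PySem.Dict.counter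
          (PySem.List.slice discount (some i) (some (i + 10)))) need = true
          then answer + 1 else answer) 0 (PySem.List.pyRange 0 (PySem.List.len discount - 9) 1)
          = ((List.range (discount.length - 10 + 1)).countP
              (fun j => badCnt need (Ufor need discount) (cw discount j) == 0) : Int) := by
        rw [PySem.List.foldl_count_if]
        rw [PySem.List.pyRange_one, List.countP_map]
        have hnn : ((PySem.List.len discount - 9 - 0).toNat) = discount.length - 10 + 1 := by
          simp [PySem.List.len_eq]; omega
        rw [hnn, zero_add]
        congr 1
        refine List.countP_congr (fun j hj => ?_)
        rw [List.mem_range] at hj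
        have hwin : PySem.List.slice discount (some ((0:Int) + (j:Int)))
            (some ((0:Int) + (j:Int) + 10)) = (discount.drop j).take 10 := by
          rw [show ((0:Int) + (j:Int)) = ((j:Nat):Int) by push_cast; ring,
            show (((j:Nat):Int) + 10) = (((j + 10 : Nat)):Int) by push_cast; ring]
          rw [PySem.List.slice_natCast]
          congr 1
          omega
        simp only [Function.comp, hwin]
        have hmemU : ∀ k, cw discount j k ≠ 0 ∨ k ∈ need.keys → k ∈ Ufor need discount := by
          intro k hor
          refine (mem_Ufor need discount k).mpr ?_
          rcases hor with hcc | hm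
          · refine Or.inr ?_
            have hcp : 0 < ((discount.drop j).take 10).count k := by
              unfold cw at hcc; omega
            exact List.mem_of_mem_drop (List.mem_of_mem_take (List.count_pos_iff.mp hcp))
          · exact Or.inl hm
        rw [pyDictEq_counter_iff need hk hpos ((discount.drop j).take 10),
          beq_iff_eq, badCnt_eq_zero_iff need (Ufor need discount) (cw discount j) hmemU]
        exact Iff.rfl
      exact hAeq.trans hBeq.symm
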